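-- pv_equiv track=rewrite | github.com/RohitBagda/NetworkScienceCapstone | src/EdgeProcessor.py | show_edges_with_num_players_as_weights
-- ===== SOURCE A (Python) =====
-- def show_edges_with_num_players_as_weights(list_edges):
--     edges_with_num_players_as_weights = {}
--     for edge in list_edges:
--         if edge in edges_with_num_players_as_weights:
--             edges_with_num_players_as_weights[edge] += 1
--         else:
--             edges_with_num_players_as_weights[edge] = 1
--     return edges_with_num_players_as_weights
-- ===== SOURCE B (Python) =====
-- def show_edges_with_num_players_as_weights(list_edges):
--     return {edge: list_edges.count(edge) for edge in dict.fromkeys(list_edges)}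
-- ===== Notes on version B (the rewrite author's own statement) =====
-- stated objective: idiomatic
-- what changed: Replaced A's single accumulating pass (membership test + increment per element) by a distinct-keys-then-count comprehension: dedupe the edges in first-occurrence order with dict.fromkeys, then count each distinct edge with list.count.
import Mathlib
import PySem

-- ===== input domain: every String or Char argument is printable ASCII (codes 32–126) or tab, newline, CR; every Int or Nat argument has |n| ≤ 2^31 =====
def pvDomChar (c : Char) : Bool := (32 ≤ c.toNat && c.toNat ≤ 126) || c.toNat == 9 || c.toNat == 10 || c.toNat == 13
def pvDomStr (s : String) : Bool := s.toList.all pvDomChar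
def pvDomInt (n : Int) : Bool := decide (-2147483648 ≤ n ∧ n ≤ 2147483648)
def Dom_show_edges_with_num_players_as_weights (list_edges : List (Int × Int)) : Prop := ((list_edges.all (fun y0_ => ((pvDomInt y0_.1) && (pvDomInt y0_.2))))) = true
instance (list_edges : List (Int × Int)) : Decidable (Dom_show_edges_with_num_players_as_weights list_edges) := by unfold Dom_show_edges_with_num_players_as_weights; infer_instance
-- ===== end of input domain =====

-- B replaces A's single accumulating dict pass by dedupe-then-count (idiomatic comprehension; same results).
-- ===== PORT A =====
def show_edges_with_num_players_as_weights (list_edges : List (Int × Int)) : List (Int × Int × Int) :=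
  -- edges_with_num_players_as_weights = {}; for edge in list_edges: if edge in d: d[edge] += 1 else: d[edge] = 1
  let d := list_edges.foldl
    (fun (d : PySem.Dict (Int × Int) Int) edge =>
      if d.contains edge then d.modify edge 0 (· + 1) else d.insert edge 1)
    PySem.Dict.empty
  -- return the dict (as its items, flattened to triples)
  d.items.map (fun p => (p.1.1, p.1.2, p.2))

-- ===== PORT B =====
def show_edges_with_num_players_as_weights_alt (list_edges : List (Int × Int)) : List (Int × Int × Int) :=
  -- {edge: list_edges.count(edge) for edge in dict.fromkeys(list_edges)}
  (PySem.List.dedup list_edges).map (fun edge => (edge.1, edge.2, (PySem.List.count list_edges edge : Int)))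

-- ===== PRECONDITION & SPEC =====
def Spec_show_edges_with_num_players_as_weights (list_edges : List (Int × Int)) (out : List (Int × Int × Int)) : Prop := out = show_edges_with_num_players_as_weights_alt list_edges
instance (list_edges : List (Int × Int)) (out : List (Int × Int × Int)) : Decidable (Spec_show_edges_with_num_players_as_weights list_edges out) := by unfold Spec_show_edges_with_num_players_as_weights; infer_instance

-- ===== CLAIM (what is proved, stated in full; the proofs are below) =====
def Claim_equal_show_edges_with_num_players_as_weights : Prop := ∀ (list_edges : List (Int × Int)), Dom_show_edges_with_num_players_as_weights list_edges → Spec_show_edges_with_num_players_as_weights list_edges (show_edges_with_num_players_as_weights list_edges)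

-- ===== LEMMAS AND PROOFS =====

-- ===== VERDICT (by name: the statement is the Claim_ definition above) =====
-- A's loop body is exactly Counter's step: both branches are d.modify edge 0 (· + 1).
lemma stepA_eq_counter_step (d : PySem.Dict (Int × Int) Int) (e : Int × Int) :
    (if d.contains e then d.modify e 0 (· + 1) else d.insert e 1) = d.modify e 0 (· + 1) := by
  by_cases h : d.contains e = true
  · simp [h, PySem.Dict.modify]
  · have hf : d.contains e = false := by simpa using h
    rw [if_neg h, PySem.Dict.modify, PySem.Dict.getD_of_not_contains d 0 hf, zero_add]

theorem show_edges_with_num_players_as_weights_spec : Claim_equal_show_edges_with_num_players_as_weights := by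
  intro xs _
  unfold Spec_show_edges_with_num_players_as_weights
  unfold show_edges_with_num_players_as_weights show_edges_with_num_players_as_weights_alt
  have hfold : xs.foldl
      (fun (d : PySem.Dict (Int × Int) Int) edge =>
        if d.contains edge then d.modify edge 0 (· + 1) else d.insert edge 1)
      PySem.Dict.empty = PySem.Dict.counter xs := by
    rw [PySem.Dict.counter_eq_foldl,
      funext (fun d => funext (fun e => stepA_eq_counter_step d e))]
  simp only [hfold, PySem.Dict.items_counter, List.map_map, PySem.List.dedup_eq_ofList,
    PySem.List.count_eq]
  rfl
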